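-- pv_equiv track=rewrite | github.com/weiso131/squid_AI_train | squid_GYM_env.py | Rankdiscrete
-- ===== SOURCE A (Python) =====
-- def Rankdiscrete(data):
--         discreteState = []
--         for i in range(4):
--             discreteState.append(0)
--             for j in range(i):
--                 if (data[j] > data[i]):
--                     discreteState[i] += 1
--                 else:
--                     discreteState[j] += 1
--
--         return discreteState
-- ===== SOURCE B (Python) =====
-- def Rankdiscrete(data):
--     return [sum(1 for j in range(k) if data[j] > data[k])
--             + sum(1 for j in range(k + 1, 4) if data[j] >= data[k])
--             for k in range(4)]
-- ===== Notes on version B (the rewrite author's own statement) =====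
-- stated objective: simpler
-- what changed: Replaces A's triangular double-loop that mutates two counters of a growing list per pair with a per-index comprehension computing each rank directly as one count (strict for earlier indices, non-strict for later, preserving A's tie rule).
import Mathlib
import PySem

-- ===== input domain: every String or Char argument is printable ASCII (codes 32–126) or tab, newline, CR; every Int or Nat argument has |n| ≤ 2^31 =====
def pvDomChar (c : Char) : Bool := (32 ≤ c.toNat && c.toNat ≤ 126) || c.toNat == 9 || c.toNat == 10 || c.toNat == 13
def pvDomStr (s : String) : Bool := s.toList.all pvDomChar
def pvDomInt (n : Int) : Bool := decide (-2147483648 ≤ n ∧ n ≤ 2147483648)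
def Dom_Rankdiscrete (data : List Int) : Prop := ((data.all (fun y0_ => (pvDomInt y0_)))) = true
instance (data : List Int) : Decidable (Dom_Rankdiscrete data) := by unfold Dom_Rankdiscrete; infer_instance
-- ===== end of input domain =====

-- B replaces A's triangular two-counter mutation pass with an independent per-index count (simpler decomposition); A raises IndexError on lists shorter than 4, excluded by Pre_.


-- ===== PORT A =====
-- literal port of A's nested loops: outer i appends 0, inner j mutates slot i or slot j.
-- data indexing uses pyGet? with a default; Pre_ guarantees the index is in range, so the default is never read.
def Rankdiscrete (data : List Int) : List Int :=
  (PySem.List.pyRange 0 4 1).foldl (fun st i =>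
    let st := st ++ [0]
    (PySem.List.pyRange 0 i 1).foldl (fun st j =>
      if ((PySem.List.pyGet? data j).getD 0) > ((PySem.List.pyGet? data i).getD 0) then
        st.modify i.toNat (· + 1)
      else
        st.modify j.toNat (· + 1)) st) []

-- ===== PORT B =====
-- literal port of B: for each k, count of strictly-greater earlier elements plus ≥ later elements.
def Rankdiscrete_alt (data : List Int) : List Int :=
  (PySem.List.pyRange 0 4 1).map (fun k =>
    ((PySem.List.pyRange 0 k 1).filter (fun j =>
        ((PySem.List.pyGet? data j).getD 0) > ((PySem.List.pyGet? data k).getD 0))).length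
    + ((PySem.List.pyRange (k + 1) 4 1).filter (fun j =>
        ((PySem.List.pyGet? data j).getD 0) ≥ ((PySem.List.pyGet? data k).getD 0))).length)

-- ===== PRECONDITION & SPEC =====
-- A (and B) raise IndexError when the list has fewer than 4 elements; Pre_ excludes exactly those inputs.
def Pre_Rankdiscrete (data : List Int) : Prop := 4 ≤ data.length
instance (data : List Int) : Decidable (Pre_Rankdiscrete data) := by unfold Pre_Rankdiscrete; infer_instance
def pvWitness_Rankdiscrete : List Int := [3, 1, 2, 2]
def Spec_Rankdiscrete (data : List Int) (out : List Int) : Prop := out = Rankdiscrete_alt data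
instance (data : List Int) (out : List Int) : Decidable (Spec_Rankdiscrete data out) := by unfold Spec_Rankdiscrete; infer_instance

-- ===== CLAIM (what is proved, stated in full; the proofs are below) =====
def Claim_equal_Rankdiscrete : Prop := ∀ (data : List Int), Dom_Rankdiscrete data → Pre_Rankdiscrete data → Spec_Rankdiscrete data (Rankdiscrete data)

-- ===== LEMMAS AND PROOFS =====

set_option maxHeartbeats 2000000 in
theorem Rankdiscrete_four (a b c d : Int) (t : List Int) :
    Rankdiscrete (a :: b :: c :: d :: t) = Rankdiscrete_alt (a :: b :: c :: d :: t) := by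
  have h0 : PySem.List.pyRange 0 0 1 = [] := by decide
  have h1 : PySem.List.pyRange 0 1 1 = [0] := by decide
  have h2 : PySem.List.pyRange 0 2 1 = [0, 1] := by decide
  have h3 : PySem.List.pyRange 0 3 1 = [0, 1, 2] := by decide
  have h4 : PySem.List.pyRange 0 4 1 = [0, 1, 2, 3] := by decide
  have g1 : PySem.List.pyRange (0 + 1) 4 1 = [1, 2, 3] := by decide
  have g2 : PySem.List.pyRange (1 + 1) 4 1 = [2, 3] := by decide
  have g3 : PySem.List.pyRange (2 + 1) 4 1 = [3] := by decide
  have g4 : PySem.List.pyRange (3 + 1) 4 1 = [] := by decide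
  have pa : PySem.List.pyGet? (a :: b :: c :: d :: t) 0 = some a :=
    PySem.List.pyGet?_zero_cons a _
  have pb : PySem.List.pyGet? (a :: b :: c :: d :: t) 1 = some b :=
    PySem.List.pyGet?_ofNat (n := 1) _ (by simp)
  have pc : PySem.List.pyGet? (a :: b :: c :: d :: t) 2 = some c :=
    PySem.List.pyGet?_ofNat (n := 2) _ (by simp)
  have pd : PySem.List.pyGet? (a :: b :: c :: d :: t) 3 = some d :=
    PySem.List.pyGet?_ofNat (n := 3) _ (by simp)
  simp only [Rankdiscrete, Rankdiscrete_alt, h0, h1, h2, h3, h4, g1, g2, g3, g4,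
    List.foldl, List.map, List.filter_cons, List.filter_nil,
    pa, pb, pc, pd, Option.getD, decide_eq_true_eq, gt_iff_lt, ge_iff_le, ← not_lt, ite_not]
  split_ifs <;> simp [List.modify]

-- ===== VERDICT (by name: the statement is the Claim_ definition above) =====
theorem Rankdiscrete_spec : Claim_equal_Rankdiscrete := by
  intro data _ hpre
  unfold Spec_Rankdiscrete
  match data, hpre with
  | a :: b :: c :: d :: t, _ => exact Rankdiscrete_four a b c d t
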